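-- pv_equiv track=rewrite | github.com/Jillpie/TheOrangeAlliance | python/MatchOutput.py | alliance
-- ===== SOURCE A (Python) =====
-- def alliance(rows, matchHistoryTable):
-- 	for i in range(0, rows, 4):
-- 		matchHistoryTable[i][1] = "Red"
-- 	for i in range(1, rows, 4):
-- 		matchHistoryTable[i][1] = "Red"
-- 	for i in range(2, rows, 4):
-- 		matchHistoryTable[i][1] = "Blue"
-- 	for i in range(3, rows, 4):
-- 		matchHistoryTable[i][1] = "Blue"
-- 	return matchHistoryTable
-- ===== SOURCE B (Python) =====
-- def alliance(rows, matchHistoryTable):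
-- 	for i in range(rows):
-- 		matchHistoryTable[i][1] = "Red" if i % 4 < 2 else "Blue"
-- 	return matchHistoryTable
-- ===== Notes on version B (the rewrite author's own statement) =====
-- stated objective: simpler
-- what changed: Replaces A's four strided passes (one per residue class mod 4) by a single contiguous pass over range(rows) choosing the label with i % 4 < 2.
import Mathlib
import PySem

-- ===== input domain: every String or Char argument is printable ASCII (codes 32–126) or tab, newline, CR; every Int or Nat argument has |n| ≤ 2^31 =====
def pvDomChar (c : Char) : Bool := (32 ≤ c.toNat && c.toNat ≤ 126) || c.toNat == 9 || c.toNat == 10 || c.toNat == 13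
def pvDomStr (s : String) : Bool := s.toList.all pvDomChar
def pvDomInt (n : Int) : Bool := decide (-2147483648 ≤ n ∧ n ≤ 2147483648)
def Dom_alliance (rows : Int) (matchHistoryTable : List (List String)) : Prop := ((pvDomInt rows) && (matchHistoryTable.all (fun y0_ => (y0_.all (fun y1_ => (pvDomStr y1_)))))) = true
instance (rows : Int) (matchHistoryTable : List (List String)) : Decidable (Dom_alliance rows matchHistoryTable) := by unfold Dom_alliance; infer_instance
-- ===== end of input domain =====

-- B replaces A's four strided passes by one contiguous pass with an `i % 4 < 2` branch;
-- both Pythons mutate matchHistoryTable in place identically, the equivalence proved is about the return value.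

-- ===== PORT A =====
-- Four strided loops; `t[i][1] = lbl` is `List.modify i.toNat (row.set 1 lbl)` (indices are nonnegative,
-- and Pre_ keeps them in range, where Python would raise).
def alliance (rows : Int) (matchHistoryTable : List (List String)) : List (List String) :=
  let t1 := (PySem.List.pyRange 0 rows 4).foldl
    (fun acc i => acc.modify i.toNat (fun r => r.set 1 "Red")) matchHistoryTable
  let t2 := (PySem.List.pyRange 1 rows 4).foldl
    (fun acc i => acc.modify i.toNat (fun r => r.set 1 "Red")) t1
  let t3 := (PySem.List.pyRange 2 rows 4).foldl
    (fun acc i => acc.modify i.toNat (fun r => r.set 1 "Blue")) t2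
  let t4 := (PySem.List.pyRange 3 rows 4).foldl
    (fun acc i => acc.modify i.toNat (fun r => r.set 1 "Blue")) t3
  t4

-- ===== PORT B =====
-- One loop over range(rows) with a branch on i % 4 (i is nonnegative, so Int.emod matches Python's %).
def alliance_alt (rows : Int) (matchHistoryTable : List (List String)) : List (List String) :=
  (PySem.List.pyRange 0 rows 1).foldl
    (fun acc i => acc.modify i.toNat (fun r => r.set 1 (if i % 4 < 2 then "Red" else "Blue")))
    matchHistoryTable

-- ===== PRECONDITION & SPEC =====
-- Exactly where the Python A returns (no IndexError): every visited index i < rows is a valid row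
-- of the table and that row has at least 2 entries so t[i][1] = … succeeds.
def Pre_alliance (rows : Int) (matchHistoryTable : List (List String)) : Prop :=
  rows ≤ (matchHistoryTable.length : Int) ∧
  ∀ r ∈ matchHistoryTable.take rows.toNat, 2 ≤ r.length
instance (rows : Int) (matchHistoryTable : List (List String)) : Decidable (Pre_alliance rows matchHistoryTable) := by unfold Pre_alliance; infer_instance

def pvWitness_alliance : Int × List (List String) := (3, [["1", "x"], ["2", "y"], ["3", "z"], ["4", "w"]])

def Spec_alliance (rows : Int) (matchHistoryTable : List (List String)) (out : List (List String)) : Prop := out = alliance_alt rows matchHistoryTable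
instance (rows : Int) (matchHistoryTable : List (List String)) (out : List (List String)) : Decidable (Spec_alliance rows matchHistoryTable out) := by unfold Spec_alliance; infer_instance

-- ===== CLAIM (what is proved, stated in full; the proofs are below) =====
def Claim_equal_alliance : Prop := ∀ (rows : Int) (matchHistoryTable : List (List String)), Dom_alliance rows matchHistoryTable → Pre_alliance rows matchHistoryTable → Spec_alliance rows matchHistoryTable (alliance rows matchHistoryTable)

-- ===== LEMMAS AND PROOFS =====

-- A fold of `modify`s at distinct nonnegative indices, read pointwise.
theorem foldl_modify_getElem? {α : Type} (L : List Int) (g : Int → α → α) (t : List α) (j : Nat)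
    (hnd : L.Nodup) (hnn : ∀ i ∈ L, 0 ≤ i) :
    (L.foldl (fun acc i => acc.modify i.toNat (g i)) t)[j]? =
      if (j : Int) ∈ L then (g j) <$> t[j]? else t[j]? := by
  induction L generalizing t with
  | nil => simp
  | cons i L ih =>
    rcases List.nodup_cons.mp hnd with ⟨hi, hndL⟩
    have h0 : 0 ≤ i := hnn i (List.mem_cons_self)
    have hnnL : ∀ x ∈ L, 0 ≤ x := fun x hx => hnn x (List.mem_cons_of_mem _ hx)
    rw [List.foldl_cons, ih _ hndL hnnL]
    by_cases hmem : (j : Int) ∈ L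
    · have hij : i ≠ (j : Int) := fun h => hi (h ▸ hmem)
      have : i.toNat ≠ j := by omega
      simp [hmem, this, List.mem_cons]
    · by_cases hij : i = (j : Int)
      · have : i.toNat = j := by omega
        simp [hmem, hij, List.mem_cons]
      · have hne : i.toNat ≠ j := by omega
        have hji : (j : Int) ≠ i := fun h => hij h.symm
        simp [hmem, hne, hji, List.mem_cons]

theorem nodup_pyRange_pos (a b s : Int) (hs : 0 < s) : (PySem.List.pyRange a b s).Nodup := by
  rw [PySem.List.pyRange_of_pos a b hs]
  exact List.Nodup.map (fun x y h => by
    have : a + s * (x : Int) = a + s * (y : Int) := h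
    have : (x : Int) = y := by
      have hs' : s ≠ 0 := by omega
      nlinarith [this]
    exact_mod_cast this) (List.nodup_range)

theorem nonneg_mem_pyRange_pos (a b s : Int) (ha : 0 ≤ a) (hs : 0 < s) :
    ∀ i ∈ PySem.List.pyRange a b s, 0 ≤ i := by
  intro i hi
  have := (PySem.List.mem_pyRange_iff_of_pos hs i).mp hi
  omega

theorem alliance_spec : Claim_equal_alliance := by
  intro rows t _ _
  unfold Spec_alliance alliance alliance_alt
  apply List.ext_getElem?
  intro j
  rw [foldl_modify_getElem? _ _ _ _ (nodup_pyRange_pos 3 rows 4 (by norm_num)) (nonneg_mem_pyRange_pos 3 rows 4 (by norm_num) (by norm_num))]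
  rw [foldl_modify_getElem? _ _ _ _ (nodup_pyRange_pos 2 rows 4 (by norm_num)) (nonneg_mem_pyRange_pos 2 rows 4 (by norm_num) (by norm_num))]
  rw [foldl_modify_getElem? _ _ _ _ (nodup_pyRange_pos 1 rows 4 (by norm_num)) (nonneg_mem_pyRange_pos 1 rows 4 (by norm_num) (by norm_num))]
  rw [foldl_modify_getElem? _ _ _ _ (nodup_pyRange_pos 0 rows 4 (by norm_num)) (nonneg_mem_pyRange_pos 0 rows 4 (by norm_num) (by norm_num))]
  rw [foldl_modify_getElem? _ _ _ _ (nodup_pyRange_pos 0 rows 1 (by norm_num)) (nonneg_mem_pyRange_pos 0 rows 1 (by norm_num) (by norm_num))]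
  simp only [PySem.List.mem_pyRange_iff_of_pos (by norm_num : (0:Int) < 4),
    PySem.List.mem_pyRange_iff_of_pos (by norm_num : (0:Int) < 1)]
  by_cases hlt : (j : Int) < rows
  · have h1 : (0:Int) ≤ (j:Int) ∧ (j:Int) < rows ∧ (1:Int) ∣ (j:Int) - 0 := by
      refine ⟨by omega, hlt, one_dvd _⟩
    rw [if_pos h1]
    have hm : (j:Int) % 4 = 0 ∨ (j:Int) % 4 = 1 ∨ (j:Int) % 4 = 2 ∨ (j:Int) % 4 = 3 := by omega
    rcases hm with h | h | h | h
    · have d0 : (4:Int) ∣ (j:Int) - 0 := by omega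
      rw [if_pos (⟨by omega, hlt, d0⟩ : (0:Int) ≤ (j:Int) ∧ (j:Int) < rows ∧ (4:Int) ∣ (j:Int) - 0),
          if_neg (by omega : ¬((1:Int) ≤ (j:Int) ∧ (j:Int) < rows ∧ (4:Int) ∣ (j:Int) - 1)),
          if_neg (by omega : ¬((2:Int) ≤ (j:Int) ∧ (j:Int) < rows ∧ (4:Int) ∣ (j:Int) - 2)),
          if_neg (by omega : ¬((3:Int) ≤ (j:Int) ∧ (j:Int) < rows ∧ (4:Int) ∣ (j:Int) - 3))]
      simp [h]
    · rw [if_neg (by omega : ¬((0:Int) ≤ (j:Int) ∧ (j:Int) < rows ∧ (4:Int) ∣ (j:Int) - 0)),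
          if_pos (⟨by omega, hlt, by omega⟩ : (1:Int) ≤ (j:Int) ∧ (j:Int) < rows ∧ (4:Int) ∣ (j:Int) - 1),
          if_neg (by omega : ¬((2:Int) ≤ (j:Int) ∧ (j:Int) < rows ∧ (4:Int) ∣ (j:Int) - 2)),
          if_neg (by omega : ¬((3:Int) ≤ (j:Int) ∧ (j:Int) < rows ∧ (4:Int) ∣ (j:Int) - 3))]
      simp [h]
    · rw [if_neg (by omega : ¬((0:Int) ≤ (j:Int) ∧ (j:Int) < rows ∧ (4:Int) ∣ (j:Int) - 0)),
          if_neg (by omega : ¬((1:Int) ≤ (j:Int) ∧ (j:Int) < rows ∧ (4:Int) ∣ (j:Int) - 1)),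
          if_pos (⟨by omega, hlt, by omega⟩ : (2:Int) ≤ (j:Int) ∧ (j:Int) < rows ∧ (4:Int) ∣ (j:Int) - 2),
          if_neg (by omega : ¬((3:Int) ≤ (j:Int) ∧ (j:Int) < rows ∧ (4:Int) ∣ (j:Int) - 3))]
      simp [h]
    · rw [if_neg (by omega : ¬((0:Int) ≤ (j:Int) ∧ (j:Int) < rows ∧ (4:Int) ∣ (j:Int) - 0)),
          if_neg (by omega : ¬((1:Int) ≤ (j:Int) ∧ (j:Int) < rows ∧ (4:Int) ∣ (j:Int) - 1)),
          if_neg (by omega : ¬((2:Int) ≤ (j:Int) ∧ (j:Int) < rows ∧ (4:Int) ∣ (j:Int) - 2)),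
          if_pos (⟨by omega, hlt, by omega⟩ : (3:Int) ≤ (j:Int) ∧ (j:Int) < rows ∧ (4:Int) ∣ (j:Int) - 3)]
      simp [h]
  · rw [if_neg (by omega : ¬((0:Int) ≤ (j:Int) ∧ (j:Int) < rows ∧ (4:Int) ∣ (j:Int) - 0)),
        if_neg (by omega : ¬((1:Int) ≤ (j:Int) ∧ (j:Int) < rows ∧ (4:Int) ∣ (j:Int) - 1)),
        if_neg (by omega : ¬((2:Int) ≤ (j:Int) ∧ (j:Int) < rows ∧ (4:Int) ∣ (j:Int) - 2)),
        if_neg (by omega : ¬((3:Int) ≤ (j:Int) ∧ (j:Int) < rows ∧ (4:Int) ∣ (j:Int) - 3)),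
        if_neg (by omega : ¬((0:Int) ≤ (j:Int) ∧ (j:Int) < rows ∧ (1:Int) ∣ (j:Int) - 0))]
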